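-- pv_equiv track=rewrite | github.com/Apothor/Codecademy | Code Challenges/22. Find the Missing Number/Find the Missing Number.py | missingNOs
-- ===== SOURCE A (Python) =====
-- def missingNOs(arr):
--
--     # Initialize an array of integers [1, 2, 3, …, 100], 'nums' and an empty results array, 'found_nums'
--     nums = list(range(1, 101))
--     found_nums = []
--
--     # Test this array against the input array.
--     for num in nums:
--
--         # If an integer is missing, add this integer to found_nums.
--         if num not in arr:
--             found_nums.append(num)
--
--             # If two missing nubmers are found, return the numbers.
--             if len(found_nums) == 2:
--                 return found_nums
-- ===== SOURCE B (Python) =====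
-- def missingNOs(arr):
--     # sort the distinct in-range values, then enumerate the gaps between consecutive ones
--     present = sorted({x for x in arr if 1 <= x <= 100})
--     missing = []
--     prev = 0
--     for v in present:
--         missing.extend(range(prev + 1, v))
--         prev = v
--     missing.extend(range(prev + 1, 101))
--     return missing[:2] if len(missing) >= 2 else None
-- ===== Notes on version B (the rewrite author's own statement) =====
-- stated objective: alternative
-- what changed: Instead of testing each of 1..100 for membership in arr with an early return, B sorts the distinct in-range values of arr and enumerates the gaps between consecutive present values (plus the trailing gap up to 100), then slices the first two missing numbers.
import Mathlib
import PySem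

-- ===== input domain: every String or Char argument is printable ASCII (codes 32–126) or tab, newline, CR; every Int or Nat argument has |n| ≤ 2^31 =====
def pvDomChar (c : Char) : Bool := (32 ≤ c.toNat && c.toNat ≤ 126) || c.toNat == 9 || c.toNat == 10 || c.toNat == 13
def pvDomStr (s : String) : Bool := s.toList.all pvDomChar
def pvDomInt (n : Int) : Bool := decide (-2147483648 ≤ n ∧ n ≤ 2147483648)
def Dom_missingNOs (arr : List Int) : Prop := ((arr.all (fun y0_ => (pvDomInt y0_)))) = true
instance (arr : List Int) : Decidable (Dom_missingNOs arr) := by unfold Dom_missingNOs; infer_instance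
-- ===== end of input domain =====

-- B sorts the distinct in-range values of arr and enumerates the gaps between
-- consecutive present values instead of testing each of 1..100 for membership
-- (objective: alternative algorithm, sort-then-gap-scan).

-- ===== PORT A =====
-- the for-loop over nums with the growing found_nums accumulator and the early return
def missingNOsLoop (arr : List Int) : List Int → List Int → Option (List Int)
  | [], _ => none
  | num :: rest, found_nums =>
    if arr.contains num then
      missingNOsLoop arr rest found_nums
    else
      let found_nums' := found_nums ++ [num]
      if found_nums'.length = 2 then some found_nums'
      else missingNOsLoop arr rest found_nums'

def missingNOs (arr : List Int) : Option (List Int) :=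
  let nums := PySem.List.pyRange 1 101 1
  missingNOsLoop arr nums []

-- ===== PORT B =====
-- the 'for v in present' loop: carries (missing, prev), extends missing with range(prev+1, v)
def gapLoop : List Int → List Int → Int → List Int × Int
  | [], missing, prev => (missing, prev)
  | v :: rest, missing, prev => gapLoop rest (missing ++ PySem.List.pyRange (prev + 1) v 1) v

def missingNOs_alt (arr : List Int) : Option (List Int) :=
  let present := PySem.List.sorted
    (PySem.Set.ofList (arr.filter (fun x => 1 ≤ x && x ≤ 100))) (fun x => x) false
  let mp := gapLoop present [] 0
  let missing := mp.1 ++ PySem.List.pyRange (mp.2 + 1) 101 1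
  if 2 ≤ missing.length then some (PySem.List.slice missing none (some 2)) else none

-- ===== PRECONDITION & SPEC =====
def Spec_missingNOs (arr : List Int) (out : Option (List Int)) : Prop := out = missingNOs_alt arr
instance (arr : List Int) (out : Option (List Int)) : Decidable (Spec_missingNOs arr out) := by unfold Spec_missingNOs; infer_instance

-- ===== CLAIM (what is proved, stated in full; the proofs are below) =====
def Claim_equal_missingNOs : Prop := ∀ (arr : List Int), Dom_missingNOs arr → Spec_missingNOs arr (missingNOs arr)

-- ===== LEMMAS AND PROOFS =====

-- A's loop returns the first two missing numbers of the remaining nums, on top of found_nums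
lemma missingNOsLoop_eq (arr : List Int) (nums : List Int) :
    ∀ found : List Int, found.length < 2 →
      missingNOsLoop arr nums found =
        (let m := nums.filter (fun n => !arr.contains n)
         if 2 ≤ found.length + m.length then some ((found ++ m).take 2) else none) := by
  induction nums with
  | nil =>
    intro found h
    simp only [missingNOsLoop, List.filter_nil, List.length_nil, Nat.add_zero]
    rw [if_neg (by omega)]
  | cons n ns ih =>
    intro found h
    by_cases hc : n ∈ arr
    · have h1 : missingNOsLoop arr (n :: ns) found = missingNOsLoop arr ns found := by
        simp [missingNOsLoop, hc]
      rw [h1, ih found h]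
      simp [hc]
    · match found, h with
      | [], _ =>
        have h1 : missingNOsLoop arr (n :: ns) [] = missingNOsLoop arr ns [n] := by
          simp [missingNOsLoop, hc]
        rw [h1, ih [n] (by simp)]
        simp only [List.filter_cons, List.length_cons, List.length_nil, List.cons_append, List.nil_append]
        simp [hc]
        split_ifs with h1 h2 <;> first | rfl | omega
      | [a], _ =>
        have h1 : missingNOsLoop arr (n :: ns) [a] = some [a, n] := by
          simp [missingNOsLoop, hc]
        rw [h1]
        simp [hc, List.take]

-- the gap enumeration over a strictly increasing list s of values in (prev, 101)
-- produces exactly the complement of s inside range(prev+1, 101)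
lemma gapLoop_eq (s : List Int) : ∀ (missing : List Int) (prev : Int),
    (∀ x ∈ s, prev < x ∧ x < 101) → s.Pairwise (· < ·) →
      (gapLoop s missing prev).1 ++ PySem.List.pyRange ((gapLoop s missing prev).2 + 1) 101 1
        = missing ++ (PySem.List.pyRange (prev + 1) 101 1).filter (fun n => !s.contains n) := by
  induction s with
  | nil => intro missing prev _ _; simp [gapLoop]
  | cons v rest ih =>
    intro missing prev hmem hpw
    have hv := hmem v (by simp)
    have hrest : ∀ x ∈ rest, v < x ∧ x < 101 := by
      intro x hx
      exact ⟨(List.pairwise_cons.mp hpw).1 x hx, (hmem x (by simp [hx])).2⟩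
    have hstep : gapLoop (v :: rest) missing prev
        = gapLoop rest (missing ++ PySem.List.pyRange (prev + 1) v 1) v := rfl
    rw [hstep, ih _ v hrest (List.pairwise_cons.mp hpw).2]
    -- split range(prev+1, 101) at v and at v+1
    have hsplit : PySem.List.pyRange (prev + 1) 101 1
        = PySem.List.pyRange (prev + 1) v 1 ++ (v :: PySem.List.pyRange (v + 1) 101 1) := by
      rw [PySem.List.pyRange_one_append (prev + 1) v 101 (by omega) (by omega),
          show PySem.List.pyRange v 101 1 = v :: PySem.List.pyRange (v + 1) 101 1 from
            PySem.List.pyRange_one_cons (by omega)]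
    rw [hsplit, List.filter_append, List.filter_cons]
    have hlow : (PySem.List.pyRange (prev + 1) v 1).filter (fun n => !(v :: rest).contains n)
        = PySem.List.pyRange (prev + 1) v 1 := by
      apply List.filter_eq_self.mpr
      intro n hn
      have hn' := (PySem.List.mem_pyRange_one).mp hn
      simp only [List.contains_eq_mem, Bool.not_eq_eq_eq_not, Bool.not_true, decide_eq_false_iff_not]
      intro hcon
      rcases List.mem_cons.mp hcon with h | h
      · omega
      · have := (hrest n h).1; omega
    have hhi : (PySem.List.pyRange (v + 1) 101 1).filter (fun n => !(v :: rest).contains n)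
        = (PySem.List.pyRange (v + 1) 101 1).filter (fun n => !rest.contains n) := by
      apply List.filter_congr
      intro n hn
      have hn' := (PySem.List.mem_pyRange_one).mp hn
      simp only [List.contains_eq_mem, List.mem_cons]
      have : n ≠ v := by omega
      simp [this]
    rw [hlow, hhi]
    simp

-- B's sorted-set of in-range values IS range(1,101) filtered to members of arr
lemma present_eq (arr : List Int) :
    PySem.List.sorted (PySem.Set.ofList (arr.filter (fun x => 1 ≤ x && x ≤ 100))) (fun x => x) false
      = (PySem.List.pyRange 1 101 1).filter (fun n => arr.contains n) := by
  apply PySem.List.sorted_id_eq_of_perm_of_pairwise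
  · apply (List.perm_ext_iff_of_nodup ?_ ?_).mpr
    · intro a
      simp only [List.mem_filter, PySem.List.mem_pyRange_one, PySem.Set.mem_ofList,
        List.contains_eq_mem, Bool.and_eq_true, decide_eq_true_eq]
      constructor
      · rintro ⟨⟨h1, h2⟩, h3⟩
        exact ⟨h3, h1, by omega⟩
      · rintro ⟨h3, h1, h2⟩
        exact ⟨⟨h1, by omega⟩, h3⟩
    · exact (PySem.List.nodup_pyRange_one 1 101).filter _
    · exact PySem.Set.nodup_ofList _
  · exact ((PySem.List.pairwise_lt_pyRange_one 1 101).filter _).imp le_of_lt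

lemma alt_eq (arr : List Int) :
    missingNOs_alt arr =
      (let m := (PySem.List.pyRange 1 101 1).filter (fun n => !arr.contains n)
       if 2 ≤ m.length then some (m.take 2) else none) := by
  unfold missingNOs_alt
  rw [present_eq]
  have hmem : ∀ x ∈ (PySem.List.pyRange 1 101 1).filter (fun n => arr.contains n),
      (0:Int) < x ∧ x < 101 := by
    intro x hx
    have := (PySem.List.mem_pyRange_one).mp (List.mem_of_mem_filter hx)
    omega
  have hpw : ((PySem.List.pyRange 1 101 1).filter (fun n => arr.contains n)).Pairwise (· < ·) :=
    (PySem.List.pairwise_lt_pyRange_one 1 101).filter _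
  have hkey := gapLoop_eq _ [] 0 hmem hpw
  have hfc : (PySem.List.pyRange (0 + 1) 101 1).filter
        (fun n => !((PySem.List.pyRange 1 101 1).filter (fun n => arr.contains n)).contains n)
      = (PySem.List.pyRange 1 101 1).filter (fun n => !arr.contains n) := by
    rw [show (0:Int) + 1 = 1 from rfl]
    apply List.filter_congr
    intro n hn
    simp [List.contains_eq_mem, List.mem_filter, hn]
  rw [hfc] at hkey
  have hslice : ∀ xs : List Int, PySem.List.slice xs none (some 2) = xs.take 2 := by
    intro xs
    simpa using PySem.List.slice_to_natCast xs 2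
  simp only [List.nil_append] at hkey
  simp only [hkey, hslice]

-- ===== VERDICT (by name: the statement is the Claim_ definition above) =====
theorem missingNOs_spec : Claim_equal_missingNOs := by
  intro arr _
  unfold Spec_missingNOs missingNOs
  rw [alt_eq, missingNOsLoop_eq arr _ [] (by simp)]
  simp
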